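-- pv_equiv track=rewrite | github.com/tolulawson/ralph-harness | scripts/runtime_state_helpers.py | summarize_task_entries
-- ===== SOURCE A (Python) =====
-- from typing import Any
--
-- CHECKED_TASK_STATUSES = {
--     "awaiting_review",
--     "review_failed",
--     "awaiting_verification",
--     "verification_failed",
--     "awaiting_release",
--     "release_failed",
--     "released",
--     "done",
-- }
--
-- def summarize_task_entries(entries: list[dict[str, Any]]) -> dict[str, int]:
--     total = len(entries)
--     done = sum(1 for entry in entries if entry["status"] in CHECKED_TASK_STATUSES)
--     in_progress = sum(
--         1
--         for entry in entries
--         if entry["status"] not in {"queued", "ready", "released", "done", "blocked"}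
--     )
--     blocked = sum(1 for entry in entries if entry["status"] == "blocked")
--     return {"total": total, "done": done, "in_progress": in_progress, "blocked": blocked}
-- ===== SOURCE B (Python) =====
-- CHECKED_TASK_STATUSES = {
--     "awaiting_review",
--     "review_failed",
--     "awaiting_verification",
--     "verification_failed",
--     "awaiting_release",
--     "release_failed",
--     "released",
--     "done",
-- }
--
-- _TERMINAL_OR_IDLE = {"queued", "ready", "released", "done", "blocked"}
--
-- def summarize_task_entries(entries):
--     done = in_progress = blocked = 0
--     for entry in entries:
--         s = entry["status"]
--         if s in CHECKED_TASK_STATUSES: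
--             done += 1
--         if s not in _TERMINAL_OR_IDLE:
--             in_progress += 1
--         if s == "blocked":
--             blocked += 1
--     return {"total": len(entries), "done": done, "in_progress": in_progress, "blocked": blocked}
-- ===== Notes on version B (the rewrite author's own statement) =====
-- stated objective: alternative
-- what changed: Three separate comprehension passes over the entries are replaced by one explicit loop maintaining the three counters at once (three independent if-statements, since the categories overlap).
import Mathlib
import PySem

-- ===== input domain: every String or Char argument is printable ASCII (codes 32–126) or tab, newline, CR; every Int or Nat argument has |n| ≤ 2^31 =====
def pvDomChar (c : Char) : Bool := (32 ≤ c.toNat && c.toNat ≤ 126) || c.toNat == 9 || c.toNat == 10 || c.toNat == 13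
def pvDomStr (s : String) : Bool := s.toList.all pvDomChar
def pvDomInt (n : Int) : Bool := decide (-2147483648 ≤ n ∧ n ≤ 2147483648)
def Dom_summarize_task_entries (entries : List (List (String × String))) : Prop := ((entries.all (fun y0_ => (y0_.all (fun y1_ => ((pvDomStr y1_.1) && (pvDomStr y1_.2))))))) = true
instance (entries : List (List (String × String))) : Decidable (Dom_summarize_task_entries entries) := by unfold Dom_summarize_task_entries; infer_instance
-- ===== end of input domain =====

-- B replaces A's three counting passes by one loop maintaining all three counters; same return value, no speed claim.

-- ===== PORT A =====
-- CHECKED_TASK_STATUSES (a set literal, used only for membership tests)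
def pvChecked : List String :=
  ["awaiting_review", "review_failed", "awaiting_verification", "verification_failed",
   "awaiting_release", "release_failed", "released", "done"]

-- entry["status"] : first-match lookup; Pre_ guarantees the key is present (KeyError otherwise)
def pvStatus (e : List (String × String)) : String := (List.lookup "status" e).getD ""

def summarize_task_entries (entries : List (List (String × String))) : List (String × Int) :=
  let total : Int := entries.length
  let done : Int := entries.foldl (fun acc e => if pvChecked.contains (pvStatus e) then acc + 1 else acc) 0
  let in_progress : Int := entries.foldl (fun acc e =>
    if ¬ (["queued", "ready", "released", "done", "blocked"].contains (pvStatus e)) then acc + 1 else acc) 0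
  let blocked : Int := entries.foldl (fun acc e => if pvStatus e == "blocked" then acc + 1 else acc) 0
  [("total", total), ("done", done), ("in_progress", in_progress), ("blocked", blocked)]

-- ===== PORT B =====
def pvTerminalOrIdle : List String := ["queued", "ready", "released", "done", "blocked"]

-- one loop body: three independent ifs on the same status
def pvStep (acc : Int × Int × Int) (e : List (String × String)) : Int × Int × Int :=
  let s := pvStatus e
  (if pvChecked.contains s then acc.1 + 1 else acc.1,
   if ¬ (pvTerminalOrIdle.contains s) then acc.2.1 + 1 else acc.2.1,
   if s == "blocked" then acc.2.2 + 1 else acc.2.2)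

def summarize_task_entries_alt (entries : List (List (String × String))) : List (String × Int) :=
  let r := entries.foldl pvStep (0, 0, 0)
  [("total", (entries.length : Int)), ("done", r.1), ("in_progress", r.2.1), ("blocked", r.2.2)]

-- ===== PRECONDITION & SPEC =====
-- Pre_ excludes exactly the entries without a "status" key, on which A (and B) raise KeyError.
def Pre_summarize_task_entries (entries : List (List (String × String))) : Prop :=
  entries.all (fun e => (List.lookup "status" e).isSome) = true
instance (entries : List (List (String × String))) : Decidable (Pre_summarize_task_entries entries) := by
  unfold Pre_summarize_task_entries; infer_instance

def pvWitness_summarize_task_entries : (List (List (String × String))) :=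
  [[("status", "blocked")], [("status", "coding"), ("id", "1")]]

def Spec_summarize_task_entries (entries : List (List (String × String))) (out : List (String × Int)) : Prop := out = summarize_task_entries_alt entries
instance (entries : List (List (String × String))) (out : List (String × Int)) : Decidable (Spec_summarize_task_entries entries out) := by unfold Spec_summarize_task_entries; infer_instance

-- ===== CLAIM (what is proved, stated in full; the proofs are below) =====
def Claim_equal_summarize_task_entries : Prop := ∀ (entries : List (List (String × String))), Dom_summarize_task_entries entries → Pre_summarize_task_entries entries → Spec_summarize_task_entries entries (summarize_task_entries entries)

-- ===== LEMMAS AND PROOFS =====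
-- the fused loop computes the three separate folds componentwise
theorem pvStep_foldl (entries : List (List (String × String))) (d ip b : Int) :
    entries.foldl pvStep (d, ip, b) =
      (entries.foldl (fun acc e => if pvChecked.contains (pvStatus e) then acc + 1 else acc) d,
       entries.foldl (fun acc e =>
         if ¬ (["queued", "ready", "released", "done", "blocked"].contains (pvStatus e)) then acc + 1 else acc) ip,
       entries.foldl (fun acc e => if pvStatus e == "blocked" then acc + 1 else acc) b) := by
  induction entries generalizing d ip b with
  | nil => rfl
  | cons e rest ih =>
    simp only [List.foldl, pvStep, pvTerminalOrIdle]
    exact ih _ _ _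

-- ===== VERDICT (by name: the statement is the Claim_ definition above) =====
theorem summarize_task_entries_spec : Claim_equal_summarize_task_entries := by
  intro entries _ _
  show _ = _
  simp only [summarize_task_entries, summarize_task_entries_alt, pvStep_foldl]
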